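-- pv_equiv track=rewrite | github.com/Flexlolo/aoc2021 | 19/main.py | point_overlap_max
-- ===== SOURCE A (Python) =====
-- from itertools import product
--
-- def point_overlap_max(points1, points2, best_return):
-- 	best = 0
-- 	best_pos = (0, 0, 0)
--
-- 	# for p1, p2 in product(points1, points2):
-- 	for p1_index in range(len(points1) - best_return):
-- 		p1 = points1[p1_index]
--
-- 		for p2 in points2:
-- 			pos = tuple(p1[i] - p2[i] for i in range(3))
--
-- 			points1_ = tuple(p for p in points1 if p != p1)
-- 			points2_ = tuple(p for p in points2 if p != p2)
--
-- 			count = 1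
--
-- 			for p1_, p2_ in product(points1_, points2_):
-- 				pos_ = tuple(p1_[i] - p2_[i] for i in range(3))
--
-- 				if pos_ == pos:
-- 					count += 1
--
-- 			if count > best:
-- 				best = count
-- 				best_pos = pos
--
-- 			if count > best_return:
-- 				return best, best_pos
--
-- 	return best, best_pos
-- ===== SOURCE B (Python) =====
-- from itertools import product
--
-- def point_overlap_max(points1, points2, best_return):
-- 	# Nothing to scan: the outer loop is empty or there are no candidate partners.
-- 	if len(points1) - best_return <= 0 or not points2:
-- 		return 0, (0, 0, 0)
--
-- 	# Precompute, once, everything the per-pair count needs (inclusion-exclusion):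
-- 	# off_count[d]  = number of pairs (a, b) in points1 x points2 with offset d
-- 	# cnt1/cnt2[v]  = multiplicity of the full point value in points1/points2
-- 	# m1/m2[k]      = multiplicity of the 3-prefix in points1/points2
-- 	cnt1, m1 = {}, {}
-- 	for a in points1:
-- 		ka, pa = tuple(a), tuple(a[:3])
-- 		cnt1[ka] = cnt1.get(ka, 0) + 1
-- 		m1[pa] = m1.get(pa, 0) + 1
-- 	cnt2, m2 = {}, {}
-- 	for b in points2:
-- 		kb, pb = tuple(b), tuple(b[:3])
-- 		cnt2[kb] = cnt2.get(kb, 0) + 1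
-- 		m2[pb] = m2.get(pb, 0) + 1
-- 	off_count = {}
-- 	for a, b in product(points1, points2):
-- 		d = (a[0] - b[0], a[1] - b[1], a[2] - b[2])
-- 		off_count[d] = off_count.get(d, 0) + 1
--
-- 	best = 0
-- 	best_pos = (0, 0, 0)
-- 	for i in range(len(points1) - best_return):
-- 		p1 = points1[i]
-- 		c1 = cnt1.get(tuple(p1), 0)
-- 		for p2 in points2:
-- 			pos = (p1[0] - p2[0], p1[1] - p2[1], p1[2] - p2[2])
-- 			c2 = cnt2.get(tuple(p2), 0)
-- 			count = (1 + off_count.get(pos, 0)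
-- 				- c1 * m2.get(tuple(p2[:3]), 0)
-- 				- c2 * m1.get(tuple(p1[:3]), 0)
-- 				+ c1 * c2)
-- 			if count > best:
-- 				best = count
-- 				best_pos = pos
-- 			if count > best_return:
-- 				return best, best_pos
-- 	return best, best_pos
-- ===== Notes on version B (the rewrite author's own statement) =====
-- stated objective: alternative
-- what changed: Instead of rescanning all pairs for every candidate offset (A's inner product loop), B precomputes one Counter of all pairwise offsets plus multiplicity tables of full points and 3-prefixes, and obtains each candidate's overlap count by an O(1) inclusion-exclusion lookup while scanning candidates in A's order with the same early return.
-- outside the precondition, e.g. on point_overlap_max([(0, 0, 0), (0, 0, 0)], [(0, 0, 0), (0,)], 0): A returns (1, (0, 0, 0)), B raises IndexError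
import Mathlib
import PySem

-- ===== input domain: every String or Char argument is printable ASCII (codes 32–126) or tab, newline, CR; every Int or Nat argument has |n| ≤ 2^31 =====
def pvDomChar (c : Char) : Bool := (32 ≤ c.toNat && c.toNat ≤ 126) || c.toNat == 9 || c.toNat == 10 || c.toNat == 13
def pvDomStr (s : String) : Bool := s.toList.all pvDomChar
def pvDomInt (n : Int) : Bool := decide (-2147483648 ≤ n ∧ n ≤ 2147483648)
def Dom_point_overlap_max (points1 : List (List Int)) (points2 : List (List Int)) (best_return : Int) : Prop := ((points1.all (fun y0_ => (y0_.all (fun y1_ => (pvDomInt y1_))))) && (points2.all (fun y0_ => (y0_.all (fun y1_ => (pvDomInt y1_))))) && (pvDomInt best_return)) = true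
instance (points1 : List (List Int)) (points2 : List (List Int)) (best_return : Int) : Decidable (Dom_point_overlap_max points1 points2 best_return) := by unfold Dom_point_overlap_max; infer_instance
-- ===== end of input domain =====

-- B replaces A's per-candidate pair rescans by one precomputed offset counter plus
-- inclusion-exclusion multiplicity tables (same scan order and early return); objective: alternative.

-- itertools.product(l1, l2), shared standard-library helper of both ports
def pvProduct (l1 l2 : List (List Int)) : List (List Int × List Int) :=
  l1.flatMap (fun a => l2.map (fun b => (a, b)))

-- ===== PORT A =====
-- tuple(p1[i] - p2[i] for i in range(3)); pyGetD is the total form of p1[i]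
-- (Python raises IndexError on points shorter than 3; Pre_ excludes every input where that is reached)
def pvOffA (p1 p2 : List Int) : List Int :=
  (PySem.List.pyRange 0 3 1).map (fun i => PySem.List.pyGetD p1 i 0 - PySem.List.pyGetD p2 i 0)

-- the inner 'for p1_, p2_ in product(points1_, points2_)' counting loop, count starts at 1
def pvCountA (points1 points2 : List (List Int)) (p1 p2 pos : List Int) : Int :=
  let points1_ := points1.filter (fun p => p ≠ p1)
  let points2_ := points2.filter (fun p => p ≠ p2)
  (pvProduct points1_ points2_).foldl
    (fun count ab => if pvOffA ab.1 ab.2 = pos then count + 1 else count) 1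

-- 'for p2 in points2' with the early 'return best, best_pos' (Sum.inl = returned, Sum.inr = fell through)
def pvInnerA (points1 points2 : List (List Int)) (p1 : List Int) (best_return : Int) :
    List (List Int) → Int × List Int → (Int × List Int) ⊕ (Int × List Int)
  | [], st => .inr st
  | p2 :: rest, (best, best_pos) =>
    let pos := pvOffA p1 p2
    let count := pvCountA points1 points2 p1 p2 pos
    let st' := if count > best then (count, pos) else (best, best_pos)
    if count > best_return then .inl st' else pvInnerA points1 points2 p1 best_return rest st'

-- 'for p1_index in range(len(points1) - best_return)': fuel = number of indices, i the
-- running index; pyGet? none = Python's IndexError (excluded by Pre_)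
def pvOuterA (points1 points2 : List (List Int)) (best_return : Int) :
    Nat → Int → Int × List Int → Int × List Int
  | 0, _, st => st
  | fuel + 1, i, (best, best_pos) =>
    match PySem.List.pyGet? points1 i with
    | none => (best, best_pos)
    | some p1 =>
      match pvInnerA points1 points2 p1 best_return points2 (best, best_pos) with
      | .inl r => r
      | .inr st' => pvOuterA points1 points2 best_return fuel (i + 1) st'

def point_overlap_max (points1 : List (List Int)) (points2 : List (List Int)) (best_return : Int) : Int × List Int :=
  pvOuterA points1 points2 best_return ((points1.length : Int) - best_return).toNat 0 (0, [0, 0, 0])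

-- ===== PORT B =====
-- tuple(a[:3])
def pvKey3 (p : List Int) : List Int := PySem.List.slice p none (some 3)

-- (p1[0]-p2[0], p1[1]-p2[1], p1[2]-p2[2])
def pvOffB (p1 p2 : List Int) : List Int :=
  [PySem.List.pyGetD p1 0 0 - PySem.List.pyGetD p2 0 0,
   PySem.List.pyGetD p1 1 0 - PySem.List.pyGetD p2 1 0,
   PySem.List.pyGetD p1 2 0 - PySem.List.pyGetD p2 2 0]

-- 'd[key x] = d.get(key x, 0) + 1' accumulation loop (builds cnt1/m1/cnt2/m2)
def pvCounterBy (l : List (List Int)) (key : List Int → List Int) : PySem.Dict (List Int) Int :=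
  l.foldl (fun d x => d.insert (key x) (d.getD (key x) 0 + 1)) PySem.Dict.empty

-- 'for a, b in product(points1, points2): off_count[d] = off_count.get(d, 0) + 1'
def pvOffCnt (l1 l2 : List (List Int)) : PySem.Dict (List Int) Int :=
  (pvProduct l1 l2).foldl
    (fun d ab => d.insert (pvOffB ab.1 ab.2) (d.getD (pvOffB ab.1 ab.2) 0 + 1)) PySem.Dict.empty

-- the inclusion-exclusion count
def pvCountB (offc cnt1 m1 cnt2 m2 : PySem.Dict (List Int) Int) (p1 p2 pos : List Int) : Int :=
  let c1 := cnt1.getD p1 0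
  let c2 := cnt2.getD p2 0
  1 + offc.getD pos 0 - c1 * m2.getD (pvKey3 p2) 0 - c2 * m1.getD (pvKey3 p1) 0 + c1 * c2

def pvInnerB (offc cnt1 m1 cnt2 m2 : PySem.Dict (List Int) Int) (p1 : List Int) (best_return : Int) :
    List (List Int) → Int × List Int → (Int × List Int) ⊕ (Int × List Int)
  | [], st => .inr st
  | p2 :: rest, (best, best_pos) =>
    let pos := pvOffB p1 p2
    let count := pvCountB offc cnt1 m1 cnt2 m2 p1 p2 pos
    let st' := if count > best then (count, pos) else (best, best_pos)
    if count > best_return then .inl st' else pvInnerB offc cnt1 m1 cnt2 m2 p1 best_return rest st'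

def pvOuterB (points1 points2 : List (List Int)) (offc cnt1 m1 cnt2 m2 : PySem.Dict (List Int) Int)
    (best_return : Int) : Nat → Int → Int × List Int → Int × List Int
  | 0, _, st => st
  | fuel + 1, i, (best, best_pos) =>
    match PySem.List.pyGet? points1 i with
    | none => (best, best_pos)
    | some p1 =>
      match pvInnerB offc cnt1 m1 cnt2 m2 p1 best_return points2 (best, best_pos) with
      | .inl r => r
      | .inr st' => pvOuterB points1 points2 offc cnt1 m1 cnt2 m2 best_return fuel (i + 1) st'

def point_overlap_max_alt (points1 : List (List Int)) (points2 : List (List Int)) (best_return : Int) : Int × List Int :=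
  if (points1.length : Int) - best_return ≤ 0 ∨ points2 = [] then (0, [0, 0, 0])
  else
    pvOuterB points1 points2 (pvOffCnt points1 points2)
      (pvCounterBy points1 (fun p => p)) (pvCounterBy points1 pvKey3)
      (pvCounterBy points2 (fun p => p)) (pvCounterBy points2 pvKey3)
      best_return ((points1.length : Int) - best_return).toNat 0 (0, [0, 0, 0])

-- ===== PRECONDITION & SPEC =====
-- Pre_ excludes exactly (a) the inputs where A's indexing raises IndexError (a point shorter
-- than 3 reached, or best_return < 0 with an empty side, where range(len-best_return) runs past
-- the list), and (b) inputs with a short point that A's early return happens to skip but that a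
-- whole-input scan must touch (B raises IndexError there); see claim cites.
def Pre_point_overlap_max (points1 : List (List Int)) (points2 : List (List Int)) (best_return : Int) : Prop :=
  (0 ≤ best_return ∧ ((points1.length : Int) ≤ best_return ∨ points2 = []))
  ∨ ((best_return < 0 → points1 ≠ [] ∧ points2 ≠ [])
      ∧ (∀ p ∈ points1, 3 ≤ p.length) ∧ (∀ p ∈ points2, 3 ≤ p.length))
instance (points1 : List (List Int)) (points2 : List (List Int)) (best_return : Int) : Decidable (Pre_point_overlap_max points1 points2 best_return) := by unfold Pre_point_overlap_max; infer_instance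

def pvWitness_point_overlap_max : List (List Int) × List (List Int) × Int :=
  ([[0, 0, 0], [1, 2, 3]], [[1, 2, 3], [2, 4, 6]], 1)

def Spec_point_overlap_max (points1 : List (List Int)) (points2 : List (List Int)) (best_return : Int) (out : Int × List Int) : Prop := out = point_overlap_max_alt points1 points2 best_return
instance (points1 : List (List Int)) (points2 : List (List Int)) (best_return : Int) (out : Int × List Int) : Decidable (Spec_point_overlap_max points1 points2 best_return out) := by unfold Spec_point_overlap_max; infer_instance

-- ===== CLAIM (what is proved, stated in full; the proofs are below) =====
def Claim_equal_point_overlap_max : Prop := ∀ (points1 : List (List Int)) (points2 : List (List Int)) (best_return : Int), Dom_point_overlap_max points1 points2 best_return → Pre_point_overlap_max points1 points2 best_return → Spec_point_overlap_max points1 points2 best_return (point_overlap_max points1 points2 best_return)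

-- ===== LEMMAS AND PROOFS =====

theorem pvOff_eq (a b : List Int) : pvOffA a b = pvOffB a b := by
  have h : PySem.List.pyRange 0 3 1 = [0, 1, 2] := by decide
  simp [pvOffA, pvOffB, h]

theorem pvKey3_char {x : List Int} (hx : 3 ≤ x.length) :
    ∃ x0 x1 x2 xr, x = x0 :: x1 :: x2 :: xr := by
  match x, hx with
  | x0 :: x1 :: x2 :: xr, _ => exact ⟨x0, x1, x2, xr, rfl⟩

theorem pvKey3_eq_iff {x y : List Int} (hx : 3 ≤ x.length) (hy : 3 ≤ y.length) :
    pvKey3 x = pvKey3 y ↔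
      (PySem.List.pyGetD x 0 0 = PySem.List.pyGetD y 0 0 ∧
       PySem.List.pyGetD x 1 0 = PySem.List.pyGetD y 1 0 ∧
       PySem.List.pyGetD x 2 0 = PySem.List.pyGetD y 2 0) := by
  obtain ⟨x0, x1, x2, xr, rfl⟩ := pvKey3_char hx
  obtain ⟨y0, y1, y2, yr, rfl⟩ := pvKey3_char hy
  simp [pvKey3, PySem.List.slice_to (xs := x0 :: x1 :: x2 :: xr) (b := 3) (by omega),
        PySem.List.slice_to (xs := y0 :: y1 :: y2 :: yr) (b := 3) (by omega),
        pysem]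

-- off p1 b = off p1 p2  ↔  b[:3] = p2[:3]   (b, p2 of length ≥ 3)
theorem pvOff_left_iff {b p2 : List Int} (hb : 3 ≤ b.length) (hp2 : 3 ≤ p2.length) (p1 : List Int) :
    pvOffB p1 b = pvOffB p1 p2 ↔ pvKey3 b = pvKey3 p2 := by
  rw [pvKey3_eq_iff hb hp2]
  simp only [pvOffB, List.cons.injEq, and_true]
  constructor
  · rintro ⟨h0, h1, h2⟩; omega
  · rintro ⟨h0, h1, h2⟩; omega

-- off a p2 = off p1 p2  ↔  a[:3] = p1[:3]   (a, p1 of length ≥ 3)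
theorem pvOff_right_iff {a p1 : List Int} (ha : 3 ≤ a.length) (hp1 : 3 ≤ p1.length) (p2 : List Int) :
    pvOffB a p2 = pvOffB p1 p2 ↔ pvKey3 a = pvKey3 p1 := by
  rw [pvKey3_eq_iff ha hp1]
  simp only [pvOffB, List.cons.injEq, and_true]
  constructor
  · rintro ⟨h0, h1, h2⟩; omega
  · rintro ⟨h0, h1, h2⟩; omega

-- counting loop keyed by 'key': recover the multiplicity
theorem pvCounter_aux {α : Type} (key : α → List Int) (l : List α) :
    ∀ (d : PySem.Dict (List Int) Int) (v : List Int),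
      (l.foldl (fun d x => d.insert (key x) (d.getD (key x) 0 + 1)) d).getD v 0
        = d.getD v 0 + (l.countP (fun x => key x = v) : Int) := by
  induction l with
  | nil => intro d v; simp
  | cons a t ih =>
    intro d v
    rw [List.foldl_cons, ih, List.countP_cons, PySem.Dict.getD_insert]
    by_cases h : key a = v
    · subst h
      simp only [if_pos rfl, decide_true, if_true]
      push_cast
      omega
    · rw [if_neg (fun e => h e.symm)]
      simp [h]

theorem pvCounterBy_getD (l : List (List Int)) (key : List Int → List Int) (v : List Int) :
    (pvCounterBy l key).getD v 0 = ((l.countP (fun x => key x = v)) : Int) := by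
  unfold pvCounterBy
  have h := pvCounter_aux key l PySem.Dict.empty v
  simpa using h

theorem pvOffCnt_getD (l1 l2 : List (List Int)) (pos : List Int) :
    (pvOffCnt l1 l2).getD pos 0 =
      (((pvProduct l1 l2).countP (fun ab => pvOffB ab.1 ab.2 = pos)) : Int) := by
  unfold pvOffCnt
  have h := pvCounter_aux (fun ab : List Int × List Int => pvOffB ab.1 ab.2)
    (pvProduct l1 l2) PySem.Dict.empty pos
  simpa using h

theorem pvCountP_single {α : Type} [DecidableEq α] (P : α → Bool) (y : α) (l : List α) :
    (l.filter (fun x => !decide (x = y))).countP P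
      + (if P y then l.countP (fun x => decide (x = y)) else 0) = l.countP P := by
  induction l with
  | nil => simp
  | cons x t ih =>
    by_cases hx : x = y <;> by_cases hpy : P y = true <;> by_cases hpx : P x = true <;>
      simp_all [List.filter_cons, List.countP_cons] <;> omega

-- abstract stand-ins: off = pvOffB, key = pvKey3
theorem pvIE_abs (off : List Int → List Int → List Int) (key : List Int → List Int)
    (l1 l2 : List (List Int)) (p1 p2 : List Int)
    (hL : ∀ b ∈ l2, (off p1 b = off p1 p2 ↔ key b = key p2))
    (hR : ∀ a ∈ l1, (off a p2 = off p1 p2 ↔ key a = key p1)) :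
    (((l1.filter (fun a => a ≠ p1)).flatMap
        (fun a => (l2.filter (fun b => b ≠ p2)).map (fun b => (a, b)))).countP
        (fun ab => off ab.1 ab.2 = off p1 p2) : Int)
      = ((l1.flatMap (fun a => l2.map (fun b => (a, b)))).countP
          (fun ab => off ab.1 ab.2 = off p1 p2) : Int)
        - ((l1.countP (fun a => a = p1)) : Int) * ((l2.countP (fun b => key b = key p2)) : Int)
        - ((l2.countP (fun b => b = p2)) : Int) * ((l1.countP (fun a => key a = key p1)) : Int)
        + ((l1.countP (fun a => a = p1)) : Int) * ((l2.countP (fun b => b = p2)) : Int) := by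
  induction l1 with
  | nil => simp
  | cons a t ih =>
    have iht := ih (fun x hx => hR x (List.mem_cons_of_mem _ hx))
    by_cases hap : a = p1
    · subst hap
      have hrow : l2.countP (fun b => decide (off a b = off a p2))
          = l2.countP (fun b => decide (key b = key p2)) :=
        List.countP_congr (fun b hb => by simp [hL b hb])
      have hrowZ : (l2.countP (fun b => decide (off a b = off a p2)) : Int)
          = (l2.countP (fun b => decide (key b = key p2)) : Int) := by exact_mod_cast hrow
      rw [List.filter_cons_of_neg (by simp)]
      simp only [List.flatMap_cons, List.countP_append, List.countP_map, List.countP_cons,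
        Function.comp_def] at iht ⊢
      simp at iht ⊢
      push_cast at iht ⊢
      linear_combination iht - hrowZ
    · have hsingle := pvCountP_single (fun b => decide (off a b = off p1 p2)) p2 l2
      rw [List.filter_cons_of_pos (by simp [hap])]
      simp only [List.flatMap_cons, List.countP_append, List.countP_map, List.countP_cons,
        Function.comp_def] at iht ⊢
      simp [hap] at iht ⊢
      by_cases hk : key a = key p1
      · have hoff : off a p2 = off p1 p2 := (hR a List.mem_cons_self).mpr hk
        rw [if_pos (by simp [hoff])] at hsingle
        have hsingleZ : ((l2.filter (fun b => !decide (b = p2))).countP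
              (fun b => decide (off a b = off p1 p2)) : Int)
              + (l2.countP (fun b => decide (b = p2)) : Int)
            = (l2.countP (fun b => decide (off a b = off p1 p2)) : Int) := by
          exact_mod_cast hsingle
        simp [hk] at iht ⊢
        push_cast at iht ⊢
        linear_combination iht + hsingleZ
      · have hoff : ¬ off a p2 = off p1 p2 := fun h => hk ((hR a List.mem_cons_self).mp h)
        rw [if_neg (by simp [hoff])] at hsingle
        have hsingleZ : ((l2.filter (fun b => !decide (b = p2))).countP
              (fun b => decide (off a b = off p1 p2)) : Int)
            = (l2.countP (fun b => decide (off a b = off p1 p2)) : Int) := by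
          exact_mod_cast hsingle
        simp [hk] at iht ⊢
        push_cast at iht ⊢
        linear_combination iht + hsingleZ

-- A's count equals B's count
theorem pvCount_eq (l1 l2 : List (List Int)) (p1 p2 : List Int)
    (h1 : ∀ p ∈ l1, 3 ≤ p.length) (h2 : ∀ p ∈ l2, 3 ≤ p.length)
    (hp1m : p1 ∈ l1) (hp2m : p2 ∈ l2) :
    pvCountA l1 l2 p1 p2 (pvOffA p1 p2)
      = pvCountB (pvOffCnt l1 l2) (pvCounterBy l1 (fun p => p)) (pvCounterBy l1 pvKey3)
          (pvCounterBy l2 (fun p => p)) (pvCounterBy l2 pvKey3) p1 p2 (pvOffB p1 p2) := by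
  have hp1 : 3 ≤ p1.length := h1 p1 hp1m
  have hp2 : 3 ≤ p2.length := h2 p2 hp2m
  have hie := pvIE_abs pvOffB pvKey3 l1 l2 p1 p2
    (fun b hb => pvOff_left_iff (h2 b hb) hp2 p1)
    (fun a ha => pvOff_right_iff (h1 a ha) hp1 p2)
  simp only [pvCountA, pvCountB, pvProduct, PySem.List.foldl_ite_add_one, pvOff_eq,
    pvOffCnt_getD, pvCounterBy_getD, id_eq] at hie ⊢
  linear_combination hie

theorem pvInner_eq (l1 l2 : List (List Int)) (p1 : List Int) (br : Int)
    (h1 : ∀ p ∈ l1, 3 ≤ p.length) (h2 : ∀ p ∈ l2, 3 ≤ p.length) (hp1m : p1 ∈ l1) :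
    ∀ (r2 : List (List Int)), (∀ p ∈ r2, p ∈ l2) → ∀ st,
      pvInnerA l1 l2 p1 br r2 st
        = pvInnerB (pvOffCnt l1 l2) (pvCounterBy l1 (fun p => p)) (pvCounterBy l1 pvKey3)
            (pvCounterBy l2 (fun p => p)) (pvCounterBy l2 pvKey3) p1 br r2 st := by
  intro r2
  induction r2 with
  | nil => intro _ st; rfl
  | cons p2 rest ih =>
    intro hmem st
    obtain ⟨best, bpos⟩ := st
    have hp2m : p2 ∈ l2 := hmem p2 (List.mem_cons_self)
    have hc := pvCount_eq l1 l2 p1 p2 h1 h2 hp1m hp2m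
    rw [pvOff_eq] at hc
    simp only [pvInnerA, pvInnerB, pvOff_eq, hc]
    split_ifs <;>
      first
        | rfl
        | exact ih (fun p hp => hmem p (List.mem_cons_of_mem _ hp)) _

theorem pvOuter_eq (l1 l2 : List (List Int)) (br : Int)
    (h1 : ∀ p ∈ l1, 3 ≤ p.length) (h2 : ∀ p ∈ l2, 3 ≤ p.length) :
    ∀ (fuel : Nat) (i : Int) (st : Int × List Int),
      pvOuterA l1 l2 br fuel i st
        = pvOuterB l1 l2 (pvOffCnt l1 l2) (pvCounterBy l1 (fun p => p)) (pvCounterBy l1 pvKey3)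
            (pvCounterBy l2 (fun p => p)) (pvCounterBy l2 pvKey3) br fuel i st := by
  intro fuel
  induction fuel with
  | zero => intro i st; rfl
  | succ n ih =>
    intro i st
    obtain ⟨best, bpos⟩ := st
    rw [pvOuterA, pvOuterB]
    cases hget : PySem.List.pyGet? l1 i with
    | none => rfl
    | some p1 =>
      have hp1m : p1 ∈ l1 := PySem.List.mem_of_pyGet?_eq_some l1 hget
      dsimp only
      rw [pvInner_eq l1 l2 p1 br h1 h2 hp1m l2 (fun p hp => hp) (best, bpos)]
      cases pvInnerB (pvOffCnt l1 l2) (pvCounterBy l1 (fun p => p)) (pvCounterBy l1 pvKey3)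
          (pvCounterBy l2 (fun p => p)) (pvCounterBy l2 pvKey3) p1 br l2 (best, bpos) with
      | inl r => rfl
      | inr st' => exact ih (i + 1) st'

theorem pvOuterA_nil (l1 : List (List Int)) (br : Int) :
    ∀ (fuel : Nat) (i : Int) (st : Int × List Int),
      pvOuterA l1 [] br fuel i st = st := by
  intro fuel
  induction fuel with
  | zero => intro i st; rfl
  | succ n ih =>
    intro i st
    obtain ⟨best, bpos⟩ := st
    rw [pvOuterA]
    cases PySem.List.pyGet? l1 i with
    | none => rfl
    | some p1 =>
      show (match pvInnerA l1 [] p1 br [] (best, bpos) with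
            | .inl r => r
            | .inr st' => pvOuterA l1 [] br n (i + 1) st') = _
      simp only [pvInnerA]
      exact ih (i + 1) (best, bpos)

-- ===== VERDICT (by name: the statement is the Claim_ definition above) =====
theorem point_overlap_max_spec : Claim_equal_point_overlap_max := by
  intro points1 points2 best_return hdom hpre
  unfold Spec_point_overlap_max point_overlap_max point_overlap_max_alt
  by_cases hg : (points1.length : Int) - best_return ≤ 0 ∨ points2 = []
  · rw [if_pos hg]
    rcases hg with hg | hg
    · rw [show ((points1.length : Int) - best_return).toNat = 0 by omega]
      rfl
    · subst hg
      exact pvOuterA_nil points1 best_return _ 0 (0, [0, 0, 0])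
  · rw [if_neg hg]
    obtain ⟨hlen, hne⟩ := not_or.mp hg
    have h123 : (∀ p ∈ points1, 3 ≤ p.length) ∧ (∀ p ∈ points2, 3 ≤ p.length) := by
      rcases hpre with ⟨hbr, h⟩ | ⟨_, h1, h2⟩
      · rcases h with h | h
        · omega
        · exact absurd h hne
      · exact ⟨h1, h2⟩
    exact pvOuter_eq points1 points2 best_return h123.1 h123.2 _ 0 (0, [0, 0, 0])
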